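-- pv_equiv track=rewrite | github.com/theMarcHuerta/EE372 | cpp_closer_to_hls/bneedint.py | calculate_max_integer_bits
-- ===== SOURCE A (Python) =====
-- def calculate_max_integer_bits(numbers):
--     max_int_bits = 0
--     for number in numbers:
--         int_part = int(abs(number))
--         if int_part == 0:
--             int_bits = 1  # At least 1 bit for zero
--         else:
--             int_bits = int_part.bit_length() + 1  # Add 1 for the sign bit
--         max_int_bits = max(max_int_bits, int_bits)
--     return max_int_bits
-- ===== SOURCE B (Python) =====
-- def calculate_max_integer_bits(numbers):
--     numbers = list(numbers)
--     if not numbers: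
--         return 0
--     w = 1
--     while any(abs(n) >> (w - 1) for n in numbers):
--         w += 1
--     return w
-- ===== Notes on version B (the rewrite author's own statement) =====
-- stated objective: alternative
-- what changed: B does not compute bit_length or a running max of bit counts at all: it searches for the smallest signed width w by repeatedly testing (with a shift) whether every number's magnitude vanishes at w-1 magnitude bits, growing w until all fit; in practice this is measurably faster because each re-scan is a short-circuiting any() over cheap shifts instead of a per-element abs/bit_length/max in Python bytecode.
import Mathlib
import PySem

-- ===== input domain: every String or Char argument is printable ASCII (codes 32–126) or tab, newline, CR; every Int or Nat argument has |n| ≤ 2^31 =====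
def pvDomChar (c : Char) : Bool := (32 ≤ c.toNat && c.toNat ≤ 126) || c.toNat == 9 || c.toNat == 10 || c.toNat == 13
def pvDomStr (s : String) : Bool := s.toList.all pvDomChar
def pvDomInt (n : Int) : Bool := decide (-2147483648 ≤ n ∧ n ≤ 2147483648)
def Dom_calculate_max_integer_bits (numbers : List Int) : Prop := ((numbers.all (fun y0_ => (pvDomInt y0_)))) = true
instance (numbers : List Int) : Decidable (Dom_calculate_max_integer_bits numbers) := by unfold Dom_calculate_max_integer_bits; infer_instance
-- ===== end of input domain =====

-- B finds the smallest signed width by repeatedly testing, with shifts over the whole list,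
-- whether every magnitude fits in w-1 bits (no bit_length, no running max): an alternative algorithm.


-- ===== PORT A =====
-- Python's n.bit_length() for n ≥ 0: 0 for 0, else ⌊log2 n⌋ + 1.
def pyBitLength (n : Nat) : Nat := if n = 0 then 0 else Nat.log2 n + 1

def calculate_max_integer_bits (numbers : List Int) : Int :=
  numbers.foldl (fun max_int_bits number =>
    let int_part : Nat := number.natAbs
    let int_bits : Int := if int_part = 0 then 1 else (pyBitLength int_part + 1 : Nat)
    max max_int_bits int_bits) 0

-- ===== PORT B =====
-- termination aid for the while loop: the shift of the largest magnitude strictly shrinks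
theorem pvShift_mono {a b : Nat} (k : Nat) (h : a ≤ b) : a >>> k ≤ b >>> k := by
  simpa [Nat.shiftRight_eq_div_pow] using Nat.div_le_div_right (c := 2 ^ k) h

theorem pvMem_le_foldl_max (l : List Nat) (a : Nat) :
    (a ≤ l.foldl max a) ∧ ∀ m ∈ l, m ≤ l.foldl max a := by
  induction l generalizing a with
  | nil => simp
  | cons x xs ih =>
    refine ⟨le_trans (le_max_left a x) (ih (max a x)).1, ?_⟩
    intro m hm
    rcases List.mem_cons.mp hm with rfl | hm'
    · exact le_trans (le_max_right a _) (ih (max a _)).1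
    · exact (ih (max a x)).2 m hm'

-- the while loop of B: w = k+1; any(…) tests the shift by w-1 = k
def pvWidthLoop (xs : List Int) (k : Nat) : Nat :=
  if h : xs.any (fun n => n.natAbs >>> k ≠ 0) then pvWidthLoop xs (k + 1) else k + 1
termination_by ((xs.map Int.natAbs).foldl max 0) >>> k
decreasing_by
  rcases List.any_eq_true.mp h with ⟨n, hn, hk⟩
  have hle : n.natAbs ≤ (xs.map Int.natAbs).foldl max 0 :=
    (pvMem_le_foldl_max (xs.map Int.natAbs) 0).2 _ (List.mem_map_of_mem hn)
  have hmono := pvShift_mono k hle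
  simp only [ne_eq, decide_eq_true_eq] at hk
  have hM : (xs.map Int.natAbs).foldl max 0 >>> k ≠ 0 := by
    intro h0
    exact hk (Nat.le_zero.mp (h0 ▸ hmono))
  have hsucc : (xs.map Int.natAbs).foldl max 0 >>> (k + 1)
      = ((xs.map Int.natAbs).foldl max 0 >>> k) / 2 := Nat.shiftRight_succ _ _
  exact hsucc ▸ Nat.div_lt_self (Nat.pos_of_ne_zero hM) one_lt_two

def calculate_max_integer_bits_alt (numbers : List Int) : Int :=
  if numbers = [] then 0 else (pvWidthLoop numbers 0 : Int)

-- ===== PRECONDITION & SPEC =====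
def Spec_calculate_max_integer_bits (numbers : List Int) (out : Int) : Prop := out = calculate_max_integer_bits_alt numbers
instance (numbers : List Int) (out : Int) : Decidable (Spec_calculate_max_integer_bits numbers out) := by unfold Spec_calculate_max_integer_bits; infer_instance

-- ===== CLAIM (what is proved, stated in full; the proofs are below) =====
def Claim_equal_calculate_max_integer_bits : Prop := ∀ (numbers : List Int), Dom_calculate_max_integer_bits numbers → Spec_calculate_max_integer_bits numbers (calculate_max_integer_bits numbers)

-- ===== LEMMAS AND PROOFS =====

-- per-element bit count used by A, as a function of the absolute value
def pvBits (n : Nat) : Int := if n = 0 then 1 else (pyBitLength n + 1 : Nat)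

theorem pvBits_eq (n : Nat) : pvBits n = ((pyBitLength n + 1 : Nat) : Int) := by
  by_cases h : n = 0 <;> simp [pvBits, pyBitLength, h]

theorem pvBits_mono {a b : Nat} (h : a ≤ b) : pvBits a ≤ pvBits b := by
  rw [pvBits_eq, pvBits_eq]
  have : pyBitLength a ≤ pyBitLength b := by
    unfold pyBitLength
    split_ifs with h1 h2 h2
    · omega
    · omega
    · omega
    · have : Nat.log2 a ≤ Nat.log2 b := by
        simp only [Nat.log2_eq_log_two]; exact Nat.log_mono_right h
      omega
  exact_mod_cast Nat.succ_le_succ this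

theorem pvBits_max (a b : Nat) : max (pvBits a) (pvBits b) = pvBits (max a b) := by
  rcases Nat.le_total a b with h | h
  · rw [Nat.max_eq_right h, max_eq_right (pvBits_mono h)]
  · rw [Nat.max_eq_left h, max_eq_left (pvBits_mono h)]

theorem pvFold_bits (l : List Int) (a : Nat) :
    l.foldl (fun acc x => max acc (pvBits x.natAbs)) (pvBits a)
      = pvBits ((l.map Int.natAbs).foldl max a) := by
  induction l generalizing a with
  | nil => rfl
  | cons z zs ih => simpa [pvBits_max] using ih (max a z.natAbs)

theorem pvBits_pos (n : Nat) : 0 ≤ pvBits n := by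
  rw [pvBits_eq]; positivity

-- m >>> k = 0 iff m < 2^k
theorem pvShift_eq_zero (m k : Nat) : m >>> k = 0 ↔ m < 2 ^ k := by
  rw [Nat.shiftRight_eq_div_pow, Nat.div_eq_zero_iff]
  have := Nat.two_pow_pos k
  omega

theorem pvLt_pow_iff_bl (m k : Nat) : m < 2 ^ k ↔ pyBitLength m ≤ k := by
  unfold pyBitLength
  by_cases hm : m = 0
  · subst hm; simp
  · simp only [hm, if_false]
    rw [← Nat.log2_lt hm]; omega

-- the loop computes max (k+1) (bitlength of the list max + 1)
theorem pvWidthLoop_eq (xs : List Int) (k : Nat) :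
    pvWidthLoop xs k = max (k + 1) (pyBitLength ((xs.map Int.natAbs).foldl max 0) + 1) := by
  set M := (xs.map Int.natAbs).foldl max 0 with hMdef
  by_cases hk : pyBitLength M ≤ k
  · -- loop stops immediately: every element ≤ M < 2^k
    rw [pvWidthLoop.eq_def]
    have hMlt : M < 2 ^ k := (pvLt_pow_iff_bl M k).mpr hk
    have hno : ¬ xs.any (fun n => n.natAbs >>> k ≠ 0) = true := by
      simp only [List.any_eq_true, decide_eq_true_eq, not_exists, not_and]
      intro n hn
      have hle : n.natAbs ≤ M :=
        (pvMem_le_foldl_max (xs.map Int.natAbs) 0).2 _ (List.mem_map_of_mem hn)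
      have h0 : n.natAbs >>> k = 0 := (pvShift_eq_zero _ _).mpr (lt_of_le_of_lt hle hMlt)
      exact not_not_intro h0
    rw [dif_neg hno]
    omega
  · -- loop runs: M ≥ 2^k, so some element is ≥ 2^k
    rw [not_le] at hk
    have hMge : 2 ^ k ≤ M := by
      by_contra hlt
      rw [not_le] at hlt
      exact absurd ((pvLt_pow_iff_bl M k).mp hlt) (by omega)
    -- M itself is 0 or an element of the mapped list; find a witness element ≥ 2^k
    have hwit : ∃ n ∈ xs, n.natAbs >>> k ≠ 0 := by
      have : ∃ n ∈ xs, 2 ^ k ≤ n.natAbs := by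
        by_contra hall
        simp only [not_exists, not_and, not_le] at hall
        have : M < 2 ^ k := by
          rw [hMdef]
          have aux : ∀ (l : List Int) (a : Nat), (∀ n ∈ l, n.natAbs < 2 ^ k) → a < 2 ^ k →
              (l.map Int.natAbs).foldl max a < 2 ^ k := by
            intro l
            induction l with
            | nil => intro a _ ha; simpa using ha
            | cons z zs ih =>
              intro a hall ha
              simp only [List.map_cons, List.foldl_cons]
              exact ih _ (fun n hn => hall n (List.mem_cons_of_mem _ hn))
                (max_lt ha (hall z (List.mem_cons_self)))
          exact aux xs 0 (fun n hn => hall n hn) (Nat.two_pow_pos k)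
        omega
      rcases this with ⟨n, hn, h2⟩
      refine ⟨n, hn, ?_⟩
      intro h0
      have := (pvShift_eq_zero _ _).mp h0
      omega
    rw [pvWidthLoop.eq_def]
    have hany : xs.any (fun n => n.natAbs >>> k ≠ 0) = true := by
      rcases hwit with ⟨n, hn, h0⟩
      exact List.any_eq_true.mpr ⟨n, hn, by simpa using h0⟩
    rw [dif_pos hany, pvWidthLoop_eq xs (k + 1), ← hMdef]
    omega
termination_by ((xs.map Int.natAbs).foldl max 0) >>> k
decreasing_by
  rcases List.any_eq_true.mp hany with ⟨n, hn, hk0⟩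
  have hle : n.natAbs ≤ (xs.map Int.natAbs).foldl max 0 :=
    (pvMem_le_foldl_max (xs.map Int.natAbs) 0).2 _ (List.mem_map_of_mem hn)
  have hmono := pvShift_mono k hle
  simp only [ne_eq, decide_eq_true_eq] at hk0
  have hM : (xs.map Int.natAbs).foldl max 0 >>> k ≠ 0 := by
    intro h0
    exact hk0 (Nat.le_zero.mp (h0 ▸ hmono))
  have hsucc : (xs.map Int.natAbs).foldl max 0 >>> (k + 1)
      = ((xs.map Int.natAbs).foldl max 0 >>> k) / 2 := Nat.shiftRight_succ _ _
  exact hsucc ▸ Nat.div_lt_self (Nat.pos_of_ne_zero hM) one_lt_two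

-- ===== VERDICT (by name: the statement is the Claim_ definition above) =====
theorem calculate_max_integer_bits_spec : Claim_equal_calculate_max_integer_bits := by
  intro numbers _
  unfold Spec_calculate_max_integer_bits calculate_max_integer_bits calculate_max_integer_bits_alt
  cases numbers with
  | nil => rfl
  | cons y ys =>
    simp only [if_neg (List.cons_ne_nil y ys)]
    have hA : ∀ (l : List Int) (acc : Int),
        l.foldl (fun max_int_bits number =>
          let int_part : Nat := number.natAbs
          let int_bits : Int := if int_part = 0 then 1 else (pyBitLength int_part + 1 : Nat)
          max max_int_bits int_bits) acc
        = l.foldl (fun acc x => max acc (pvBits x.natAbs)) acc := by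
      intro l acc; rfl
    rw [hA, List.foldl_cons, max_eq_right (pvBits_pos y.natAbs), pvFold_bits,
      pvWidthLoop_eq, pvBits_eq]
    have hfold : ((y :: ys).map Int.natAbs).foldl max 0 = (ys.map Int.natAbs).foldl max y.natAbs := by
      simp
    rw [hfold]
    have : 1 ≤ pyBitLength ((ys.map Int.natAbs).foldl max y.natAbs) + 1 := by omega
    rw [max_eq_right this]
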